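-- pv_equiv track=rewrite | github.com/mrudulakulkarni791/cn | cn4.py | first_hop_from_pred
-- ===== SOURCE A (Python) =====
-- def first_hop_from_pred(src, dest, pred):
--     """
--     Given predecessor array `pred` for paths from src, find the first hop from src to dest.
--     - If dest==src -> return src (or '-')
--     - If pred[dest] == -1 and dest != src -> unreachable
--     - Else walk backwards from dest using pred until predecessor is src: that node is next hop.
--     """
--     if dest == src:
--         return src
--     if pred[dest] == -1:
--         return None  # unreachable
--     cur = dest
--     # follow predecessors until predecessor is src
--     while pred[cur] != src:
--         cur = pred[cur]
--         # defensive check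
--         if cur == -1:
--             return None
--     return cur
-- ===== SOURCE B (Python) =====
-- def first_hop_from_pred(src, dest, pred):
--     if dest == src:
--         return src
--     if pred[dest] == -1:
--         return None
--     # Bottom-up: compute the first hop for EVERY node by fixpoint iteration
--     # of hop[i] = hop[pred[i]], seeded with the direct children of src, then
--     # read off the entry for dest.
--     n = len(pred)
--     hop = {i: i for i in range(n) if pred[i] == src}
--     changed = True
--     while changed:
--         changed = False
--         for i in range(n):
--             if i not in hop and pred[i] in hop:
--                 hop[i] = hop[pred[i]]
--                 changed = True
--     return hop.get(dest)
-- ===== Notes on version B (the rewrite author's own statement) =====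
-- stated objective: alternative
-- what changed: B replaces A's single backward pointer-chase from dest by a bottom-up dynamic program over the whole node set: it seeds a table with every direct child of src (pred[i]==src), repeatedly propagates hop[i]=hop[pred[i]] over all nodes until a fixpoint, and then merely looks up dest in the finished table.
-- outside the precondition, e.g. on first_hop_from_pred(0, -1, [9, 0]): A returns -1, B returns None; on first_hop_from_pred(0, 2, [-1, 0, 1, 3]): A returns 1, B returns 1
import Mathlib
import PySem

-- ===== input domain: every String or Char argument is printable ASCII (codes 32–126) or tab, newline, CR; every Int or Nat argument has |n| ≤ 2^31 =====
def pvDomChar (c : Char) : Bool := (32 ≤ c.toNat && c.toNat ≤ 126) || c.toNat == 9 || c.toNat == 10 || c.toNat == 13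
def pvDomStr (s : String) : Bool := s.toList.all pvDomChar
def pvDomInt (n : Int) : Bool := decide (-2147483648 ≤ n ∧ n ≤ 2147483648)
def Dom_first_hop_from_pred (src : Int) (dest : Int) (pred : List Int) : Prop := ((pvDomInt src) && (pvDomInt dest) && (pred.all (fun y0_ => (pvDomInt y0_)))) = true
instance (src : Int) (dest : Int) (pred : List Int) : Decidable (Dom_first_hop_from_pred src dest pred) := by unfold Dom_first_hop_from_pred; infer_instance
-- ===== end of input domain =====

-- B replaces A's single backward pointer-chase from dest by a bottom-up dynamic program:
-- it seeds a table with every direct child of src, propagates hop[i] = hop[pred[i]] over all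
-- nodes until a fixpoint, and then looks up dest (alternative decomposition, not claimed faster).

-- ===== PORT A =====
-- A's while loop; fuel pred.length+1 suffices on Pre_ (the walk never revisits a node there)
def fhpALoop (src : Int) (pred : List Int) : Nat → Int → Option Int
  | 0, _ => none
  | f + 1, cur =>
    match PySem.List.pyGet? pred cur with
    | none => none   -- IndexError in Python; excluded by Pre_
    | some p =>
      if p = src then some cur
      else if p = -1 then none
      else fhpALoop src pred f p

def first_hop_from_pred (src : Int) (dest : Int) (pred : List Int) : Option Int :=
  if dest = src then some src
  else
    match PySem.List.pyGet? pred dest with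
    | none => none   -- IndexError in Python; excluded by Pre_
    | some pd =>
      if pd = -1 then none
      else fhpALoop src pred (pred.length + 1) dest

-- ===== PORT B =====
-- hop = {i: i for i in range(n) if pred[i] == src}
def fhpSeed (src : Int) (pred : List Int) : PySem.Dict Int Int :=
  (List.range pred.length).foldl
    (fun h (i : Nat) =>
      match PySem.List.pyGet? pred (i : Int) with
      | some p => if p = src then h.insert (i : Int) (i : Int) else h
      | none => h)
    PySem.Dict.empty

-- body of  for i in range(n): if i not in hop and pred[i] in hop: hop[i] = hop[pred[i]]; changed = True
def fhpBStep (pred : List Int) (hc : PySem.Dict Int Int × Bool) (i : Nat) :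
    PySem.Dict Int Int × Bool :=
  if (hc.1.get? (i : Int)).isNone then
    match PySem.List.pyGet? pred (i : Int) with
    | some p =>
      match hc.1.get? p with
      | some v => (hc.1.insert (i : Int) v, true)
      | none => hc
    | none => hc
  else hc

def fhpPass (pred : List Int) (h0 : PySem.Dict Int Int) : PySem.Dict Int Int × Bool :=
  (List.range pred.length).foldl (fhpBStep pred) (h0, false)

-- while changed:  (fuel pred.length+1 always suffices: each changed pass adds a key from range(n))
def fhpRounds (pred : List Int) : Nat → PySem.Dict Int Int → PySem.Dict Int Int
  | 0, h => h
  | f + 1, h =>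
    let hc := fhpPass pred h
    if hc.2 then fhpRounds pred f hc.1 else hc.1

def first_hop_from_pred_alt (src : Int) (dest : Int) (pred : List Int) : Option Int :=
  if dest = src then some src
  else
    match PySem.List.pyGet? pred dest with
    | none => none
    | some pd =>
      if pd = -1 then none
      else (fhpRounds pred (pred.length + 1) (fhpSeed src pred)).get? dest

-- ===== PRECONDITION & SPEC =====
-- one step of A's backward walk, as a pure function (stops by absorbing)
def fhpStep (src : Int) (pred : List Int) (c : Int) : Int :=
  if 0 ≤ c ∧ c < pred.length ∧ pred[c.toNat]! ≠ src then pred[c.toNat]! else c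

-- a node where the walk has stopped: outside the index range (covers -1) or its predecessor is src
def fhpTerm (src : Int) (pred : List Int) (c : Int) : Bool :=
  decide (c < 0) || decide ((pred.length : Int) ≤ c) || decide (pred[c.toNat]! = src)

-- every entry is -1, src, or an in-range index (the natural shape of a predecessor array)
def fhpEntriesOK (src : Int) (pred : List Int) : Bool :=
  pred.all (fun p => decide (p = -1) || decide (p = src) || (decide (0 ≤ p) && decide (p < (pred.length : Int))))

-- from every node the backward walk stops within n steps (no pred-cycle without a -1/src exit)
def fhpAcyc (src : Int) (pred : List Int) : Bool :=
  (List.range pred.length).all (fun i => fhpTerm src pred ((fhpStep src pred)^[pred.length] (i : Int)))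

-- Pre_ excludes inputs where A diverges on a pred-cycle or raises IndexError, and (narrower than
-- strictly needed) inputs relying on Python's negative-index wraparound or with out-of-range
-- entries / cycles elsewhere in pred, beyond the immediate pred[dest] ∈ {-1, src} answers.
def Pre_first_hop_from_pred (src : Int) (dest : Int) (pred : List Int) : Prop :=
  dest = src ∨
    (0 ≤ dest ∧ dest < pred.length ∧
      (pred[dest.toNat]! = -1 ∨ pred[dest.toNat]! = src ∨
        (fhpEntriesOK src pred = true ∧ fhpAcyc src pred = true)))

instance (src : Int) (dest : Int) (pred : List Int) : Decidable (Pre_first_hop_from_pred src dest pred) := by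
  unfold Pre_first_hop_from_pred; infer_instance

def pvWitness_first_hop_from_pred : Int × Int × List Int := (0, 3, [-1, 0, 1, 2])

def Spec_first_hop_from_pred (src : Int) (dest : Int) (pred : List Int) (out : Option Int) : Prop := out = first_hop_from_pred_alt src dest pred
instance (src : Int) (dest : Int) (pred : List Int) (out : Option Int) : Decidable (Spec_first_hop_from_pred src dest pred out) := by unfold Spec_first_hop_from_pred; infer_instance

-- ===== CLAIM (what is proved, stated in full; the proofs are below) =====
def Claim_equal_first_hop_from_pred : Prop := ∀ (src : Int) (dest : Int) (pred : List Int), Dom_first_hop_from_pred src dest pred → Pre_first_hop_from_pred src dest pred → Spec_first_hop_from_pred src dest pred (first_hop_from_pred src dest pred)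

-- ===== LEMMAS AND PROOFS =====

theorem fhp_pyGet?_some (pred : List Int) (cur : Int) (h0 : 0 ≤ cur)
    (h1 : cur < pred.length) :
    PySem.List.pyGet? pred cur = some pred[cur.toNat]! := by
  have hlt : cur.toNat < pred.length := by omega
  have h := PySem.List.pyGet?_eq_some_getElem pred h0 h1
  rw [h]
  simp [List.getElem!_eq_getElem?_getD, List.getElem?_eq_getElem hlt]

-- generic foldl invariant
theorem fhp_foldl_inv {α σ : Type} (P : σ → Prop) (step : σ → α → σ) :
    ∀ (l : List α) (s : σ), P s → (∀ s x, x ∈ l → P s → P (step s x)) → P (l.foldl step s) := by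
  intro l
  induction l with
  | nil => intro s hs _; exact hs
  | cons x xs ih =>
    intro s hs hstep
    exact ih _ (hstep s x (by simp) hs) (fun s y hy => hstep s y (by simp [hy]))

theorem fhpEntriesOK_bound (src : Int) (pred : List Int)
    (hok : fhpEntriesOK src pred = true) (c : Int) (h0 : 0 ≤ c) (h1 : c < pred.length)
    (hns : pred[c.toNat]! ≠ src) (hn1 : pred[c.toNat]! ≠ -1) :
    0 ≤ pred[c.toNat]! ∧ pred[c.toNat]! < pred.length := by
  have hlt : c.toNat < pred.length := by omega
  have hmem : pred[c.toNat]! ∈ pred := by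
    rw [List.getElem!_eq_getElem?_getD, List.getElem?_eq_getElem hlt]
    exact List.getElem_mem hlt
  simp only [fhpEntriesOK, List.all_eq_true] at hok
  have := hok _ hmem
  simp only [Bool.or_eq_true, Bool.and_eq_true, decide_eq_true_eq] at this
  rcases this with (h | h) | h
  · exact absurd h hn1
  · exact absurd h hns
  · exact h

-- fuel compression: if the walk from c stops within k steps, fuel k+1 computes the answer
theorem fhpALoop_compress (src : Int) (pred : List Int)
    (hok : fhpEntriesOK src pred = true) :
    ∀ (k : Nat) (c : Int), 0 ≤ c → c < pred.length →
      fhpTerm src pred ((fhpStep src pred)^[k] c) = true →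
      ∀ (f : Nat) (v : Int), fhpALoop src pred f c = some v →
        fhpALoop src pred (k + 1) c = some v := by
  intro k
  induction k with
  | zero =>
    intro c h0 h1 ht f v h
    simp only [Function.iterate_zero, id_eq, fhpTerm, Bool.or_eq_true, decide_eq_true_eq] at ht
    have hsrc : pred[c.toNat]! = src := by
      rcases ht with (h' | h') | h'
      · omega
      · omega
      · exact h'
    cases f with
    | zero => simp [fhpALoop] at h
    | succ f =>
      rw [fhpALoop, fhp_pyGet?_some pred c h0 h1] at h
      dsimp only at h
      rw [if_pos hsrc] at h
      rw [fhpALoop, fhp_pyGet?_some pred c h0 h1]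
      dsimp only
      rw [if_pos hsrc]
      exact h
  | succ k ih =>
    intro c h0 h1 ht f v h
    cases f with
    | zero => simp [fhpALoop] at h
    | succ f =>
      rw [fhpALoop, fhp_pyGet?_some pred c h0 h1] at h
      rw [show k + 1 + 1 = (k + 1) + 1 from rfl, fhpALoop, fhp_pyGet?_some pred c h0 h1]
      dsimp only at h ⊢
      by_cases hsrc : pred[c.toNat]! = src
      · simp only [if_pos hsrc] at h ⊢; exact h
      · simp only [if_neg hsrc] at h ⊢
        by_cases hm1 : pred[c.toNat]! = -1
        · rw [if_pos hm1] at h; cases h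
        · simp only [if_neg hm1] at h ⊢
          obtain ⟨hp0, hp1⟩ := fhpEntriesOK_bound src pred hok c h0 h1 hsrc hm1
          have hstep : fhpStep src pred c = pred[c.toNat]! := by
            unfold fhpStep
            rw [if_pos ⟨h0, h1, hsrc⟩]
          rw [Function.iterate_succ_apply, hstep] at ht
          exact ih pred[c.toNat]! hp0 hp1 ht f v h

theorem fhpSeed_upto (src : Int) (pred : List Int) :
    ∀ (k : Nat), k ≤ pred.length → ∀ (c : Int),
      ((List.range k).foldl
        (fun h (i : Nat) =>
          match PySem.List.pyGet? pred (i : Int) with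
          | some p => if p = src then h.insert (i : Int) (i : Int) else h
          | none => h)
        PySem.Dict.empty).get? c
      = if 0 ≤ c ∧ c < (k : Int) ∧ pred[c.toNat]! = src then some c else none := by
  intro k
  induction k with
  | zero =>
    intro _ c
    rw [if_neg (by omega : ¬(0 ≤ c ∧ c < ((0:Nat) : Int) ∧ pred[c.toNat]! = src))]
    simp [PySem.Dict.get?_empty]
  | succ k ih =>
    intro hk c
    rw [List.range_succ, List.foldl_append, List.foldl_cons, List.foldl_nil]
    have hkb : ((k:Int)) < pred.length := by omega
    rw [fhp_pyGet?_some pred (k : Int) (by omega) hkb]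
    dsimp only
    have htoNat : ((k:Int)).toNat = k := by omega
    by_cases hs : pred[((k:Int)).toNat]! = src
    · rw [if_pos hs, PySem.Dict.get?_insert, ih (by omega) c]
      by_cases hc : c = (k : Int)
      · subst hc
        rw [if_pos rfl]
        rw [if_pos ⟨by omega, by omega, hs⟩]
      · rw [if_neg hc]
        by_cases hcc : 0 ≤ c ∧ c < (k : Int) ∧ pred[c.toNat]! = src
        · rw [if_pos hcc, if_pos ⟨hcc.1, by omega, hcc.2.2⟩]
        · rw [if_neg hcc, if_neg (by
            rintro ⟨a, b, d⟩
            exact hcc ⟨a, by omega, d⟩)]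
    · rw [if_neg hs, ih (by omega) c]
      by_cases hcc : 0 ≤ c ∧ c < (k : Int) ∧ pred[c.toNat]! = src
      · rw [if_pos hcc, if_pos ⟨hcc.1, by omega, hcc.2.2⟩]
      · rw [if_neg hcc, if_neg (by
          rintro ⟨a, b, d⟩
          apply hcc
          refine ⟨a, ?_, d⟩
          rcases lt_or_eq_of_le (by omega : c + 1 ≤ (k:Int) + 1) with h | h
          · omega
          · exfalso; apply hs
            have hck : c = (k:Int) := by omega
            rw [htoNat] at *
            rw [hck] at d
            simpa using d)]

theorem fhpSeed_get? (src : Int) (pred : List Int) (c : Int) :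
    (fhpSeed src pred).get? c
      = if 0 ≤ c ∧ c < (pred.length : Int) ∧ pred[c.toNat]! = src then some c else none := by
  exact fhpSeed_upto src pred pred.length le_rfl c

-- the invariant bundle maintained by B's table
def fhpInv (src : Int) (pred : List Int) (h : PySem.Dict Int Int) : Prop :=
  h.keys.Nodup ∧
  (∀ k ∈ h.keys, ∃ i ∈ List.range pred.length, (i : Int) = k) ∧
  (∀ c : Int, 0 ≤ c → c < pred.length → pred[c.toNat]! = src → (h.get? c).isSome) ∧
  (∀ k v : Int, h.get? k = some v → ∃ f, fhpALoop src pred f k = some v)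

theorem fhpSeed_get_of_src (src : Int) (pred : List Int) (c : Int) (h0 : 0 ≤ c)
    (h1 : c < pred.length) (hs : pred[c.toNat]! = src) :
    (fhpSeed src pred).get? c = some c := by
  rw [fhpSeed_get?, if_pos ⟨h0, h1, hs⟩]

theorem fhpInv_seed (src : Int) (pred : List Int) : fhpInv src pred (fhpSeed src pred) := by
  refine ⟨?_, ?_, ?_, ?_⟩
  · unfold fhpSeed
    apply fhp_foldl_inv (fun h : PySem.Dict Int Int => h.keys.Nodup)
    · exact PySem.Dict.nodup_keys_empty
    · intro h i _ hh
      cases heq : PySem.List.pyGet? pred (i : Int) with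
      | none => simpa using hh
      | some p =>
        dsimp only
        split_ifs
        · exact PySem.Dict.nodup_keys_insert _ _ _ hh
        · exact hh
  · unfold fhpSeed
    apply fhp_foldl_inv
      (fun h : PySem.Dict Int Int => ∀ k ∈ h.keys, ∃ i ∈ List.range pred.length, (i : Int) = k)
    · intro k hk
      simp [PySem.Dict.keys_empty] at hk
    · intro h i hi hh
      cases heq : PySem.List.pyGet? pred (i : Int) with
      | none => simpa using hh
      | some p =>
        dsimp only
        split_ifs
        · intro k hk
          rcases (PySem.Dict.mem_keys_insert _ _ _ _).1 hk with hk | hk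
          · exact ⟨i, hi, hk.symm⟩
          · exact hh k hk
        · exact hh
  · intro c h0 h1 hs
    rw [fhpSeed_get_of_src src pred c h0 h1 hs]
    simp
  · intro k v h
    rw [fhpSeed_get?] at h
    split_ifs at h with hc
    · obtain ⟨h0, h1, hs⟩ := hc
      refine ⟨1, ?_⟩
      rw [fhpALoop, fhp_pyGet?_some pred k h0 h1]
      dsimp only
      rw [if_pos hs]
      exact h

-- entries are never removed or changed by a pass
theorem fhpPass_preserves (pred : List Int) (h : PySem.Dict Int Int) (k v : Int)
    (hk : h.get? k = some v) : ((fhpPass pred h).1).get? k = some v := by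
  unfold fhpPass
  apply fhp_foldl_inv (fun s : PySem.Dict Int Int × Bool => s.1.get? k = some v)
  · exact hk
  · intro s i _ hs
    unfold fhpBStep
    split_ifs with hnone
    · cases heq : PySem.List.pyGet? pred (i : Int) with
      | none => exact hs
      | some p =>
        dsimp only
        cases hgp : s.1.get? p with
        | none => exact hs
        | some w =>
          dsimp only
          rw [PySem.Dict.get?_insert]
          split_ifs with hki
          · rw [hki] at hs
            rw [hs] at hnone
            simp at hnone
          · exact hs
    · exact hs

theorem fhpPass_inv (src : Int) (pred : List Int) (h : PySem.Dict Int Int)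
    (hinv : fhpInv src pred h) : fhpInv src pred (fhpPass pred h).1 := by
  unfold fhpPass
  apply fhp_foldl_inv (fun s : PySem.Dict Int Int × Bool => fhpInv src pred s.1)
  · exact hinv
  · intro s i hi hs
    obtain ⟨hnd, hkr, hsc, hsnd⟩ := hs
    unfold fhpBStep
    split_ifs with hnone
    · cases heq : PySem.List.pyGet? pred (i : Int) with
      | none => exact ⟨hnd, hkr, hsc, hsnd⟩
      | some p =>
        dsimp only
        cases hgp : s.1.get? p with
        | none => exact ⟨hnd, hkr, hsc, hsnd⟩
        | some w =>
          dsimp only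
          have hiN : (i : Int).toNat = i := by omega
          have hibs : 0 ≤ (i : Int) ∧ (i : Int) < pred.length := by
            constructor
            · omega
            · exact_mod_cast List.mem_range.1 hi
          have hpval : p = pred[(i : Int).toNat]! := by
            rw [fhp_pyGet?_some pred (i : Int) hibs.1 hibs.2] at heq
            exact (Option.some_inj.mp heq).symm
          refine ⟨PySem.Dict.nodup_keys_insert _ _ _ hnd, ?_, ?_, ?_⟩
          · intro k hk
            rcases (PySem.Dict.mem_keys_insert _ _ _ _).1 hk with hk | hk
            · exact ⟨i, hi, hk.symm⟩
            · exact hkr k hk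
          · intro c h0 h1 hcs
            rw [PySem.Dict.get?_insert]
            split_ifs with hci
            · simp
            · exact hsc c h0 h1 hcs
          · intro k v hkv
            rw [PySem.Dict.get?_insert] at hkv
            split_ifs at hkv with hki
            · obtain rfl : w = v := by simpa using hkv
              -- the inserted node i: its predecessor p is settled, p ≠ src, p ≠ -1
              have hpns : p ≠ src := by
                intro hps
                have := hsc (i : Int) hibs.1 hibs.2 (by rw [← hpval, hps])
                rw [Option.isNone_iff_eq_none] at hnone
                rw [hnone] at this
                simp at this
              have hpkey : p ∈ s.1.keys := by
                by_contra hcon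
                have hnone' := (PySem.Dict.get?_eq_none_iff_not_mem_keys _ _).2 hcon
                rw [hnone'] at hgp
                cases hgp
              have hpn1 : p ≠ -1 := by
                rcases hkr p hpkey with ⟨j, _, rfl⟩
                omega
              obtain ⟨f, hf⟩ := hsnd p w hgp
              refine ⟨f + 1, ?_⟩
              rw [fhpALoop, hki, fhp_pyGet?_some pred (i : Int) hibs.1 hibs.2, ← hpval]
              dsimp only
              rw [if_neg hpns, if_neg hpn1]
              exact hf
            · exact hsnd k v hkv
    · exact ⟨hnd, hkr, hsc, hsnd⟩

-- a pass that reports no change leaves the table untouched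
theorem fhpPass_false_eq (pred : List Int) (h : PySem.Dict Int Int)
    (hf : (fhpPass pred h).2 = false) : (fhpPass pred h).1 = h := by
  have := fhp_foldl_inv
    (fun s : PySem.Dict Int Int × Bool => s.2 = false → s.1 = h)
    (fhpBStep pred) (List.range pred.length) (h, false) (fun _ => rfl) ?_
  · exact this hf
  · intro s i _ hs
    unfold fhpBStep
    split_ifs with hnone
    · cases heq : PySem.List.pyGet? pred (i : Int) with
      | none => exact hs
      | some p =>
        dsimp only
        cases hgp : s.1.get? p with
        | none => exact hs
        | some w =>
          dsimp only
          intro hcon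
          cases hcon
    · exact hs

-- a pass that reports a change grew the table
theorem fhpPass_size (pred : List Int) (h : PySem.Dict Int Int)
    (ht : (fhpPass pred h).2 = true) : h.size + 1 ≤ ((fhpPass pred h).1).size := by
  have := fhp_foldl_inv
    (fun s : PySem.Dict Int Int × Bool =>
      h.size ≤ s.1.size ∧ (s.2 = true → h.size + 1 ≤ s.1.size))
    (fhpBStep pred) (List.range pred.length) (h, false) ⟨le_rfl, by intro hcon; cases hcon⟩ ?_
  · exact this.2 ht
  · intro s i _ hs
    unfold fhpBStep
    split_ifs with hnone
    · cases heq : PySem.List.pyGet? pred (i : Int) with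
      | none => exact hs
      | some p =>
        dsimp only
        cases hgp : s.1.get? p with
        | none => exact hs
        | some w =>
          dsimp only
          have hct : s.1.contains (i : Int) = false := by
            rw [PySem.Dict.contains_eq_isSome_get?]
            rw [Option.isNone_iff_eq_none] at hnone
            rw [hnone]
            rfl
          have hsz : (s.1.insert (i : Int) w).size = s.1.size + 1 := by
            rw [PySem.Dict.size_insert, hct]
            simp
          constructor
          · rw [hsz]; omega
          · intro _
            rw [hsz]; omega
    · exact hs

theorem fhpRounds_inv (src : Int) (pred : List Int) :
    ∀ (f : Nat) (h : PySem.Dict Int Int), fhpInv src pred h →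
      fhpInv src pred (fhpRounds pred f h) := by
  intro f
  induction f with
  | zero => intro h hh; exact hh
  | succ f ih =>
    intro h hh
    rw [fhpRounds]
    split_ifs with hb
    · exact ih _ (fhpPass_inv src pred h hh)
    · exact fhpPass_inv src pred h hh

theorem fhpRounds_preserves (pred : List Int) :
    ∀ (f : Nat) (h : PySem.Dict Int Int) (k v : Int), h.get? k = some v →
      (fhpRounds pred f h).get? k = some v := by
  intro f
  induction f with
  | zero => intro h k v hk; exact hk
  | succ f ih =>
    intro h k v hk
    rw [fhpRounds]
    split_ifs with hb
    · exact ih _ k v (fhpPass_preserves pred h k v hk)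
    · exact fhpPass_preserves pred h k v hk

-- with enough fuel the rounds reach a fixpoint
theorem fhpRounds_fix (src : Int) (pred : List Int) :
    ∀ (f : Nat) (h : PySem.Dict Int Int), fhpInv src pred h →
      pred.length + 1 ≤ f + h.size →
      fhpPass pred (fhpRounds pred f h) = (fhpRounds pred f h, false) := by
  intro f
  induction f with
  | zero =>
    intro h hh hsz
    exfalso
    obtain ⟨hnd, hkr, _, _⟩ := hh
    have hsub : h.keys ⊆ (List.range pred.length).map (fun i : Nat => (i : Int)) := by
      intro k hk
      rcases hkr k hk with ⟨i, hi, rfl⟩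
      exact List.mem_map.2 ⟨i, hi, rfl⟩
    have hlen : h.keys.length ≤ pred.length :=
      calc h.keys.length = h.keys.toFinset.card := (List.toFinset_card_of_nodup hnd).symm
        _ ≤ ((List.range pred.length).map (fun i : Nat => (i : Int))).toFinset.card := by
            apply Finset.card_le_card
            intro x hx
            rw [List.mem_toFinset] at *
            exact hsub hx
        _ ≤ ((List.range pred.length).map (fun i : Nat => (i : Int))).length :=
            List.toFinset_card_le _
        _ = pred.length := by simp
    have hkeq : h.size = h.keys.length := by
      simp [PySem.Dict.size, PySem.Dict.keys]
    omega
  | succ f ih =>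
    intro h hh hsz
    rw [fhpRounds]
    split_ifs with hb
    · exact ih _ (fhpPass_inv src pred h hh)
        (by have := fhpPass_size pred h hb; omega)
    · have h1 : (fhpPass pred h).1 = h := fhpPass_false_eq pred h (by simpa using hb)
      rw [h1]
      ext : 1
      · exact h1
      · simpa using hb

-- at a fixpoint, an unsettled node has an unsettled predecessor
theorem fhpFix_elim (pred : List Int) (T : PySem.Dict Int Int)
    (hfix : fhpPass pred T = (T, false)) (i : Nat) (hi : i ∈ List.range pred.length)
    (hn : T.get? (i : Int) = none) (p : Int) (hp : PySem.List.pyGet? pred (i : Int) = some p) :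
    T.get? p = none := by
  cases hgp : T.get? p with
  | none => rfl
  | some w =>
    exfalso
    -- the pass would have inserted i and reported a change
    have htrue : ∀ (l : List Nat) (s : PySem.Dict Int Int × Bool), s.2 = true →
        (l.foldl (fhpBStep pred) s).2 = true := by
      intro l
      induction l with
      | nil => intro s hs; exact hs
      | cons x xs ihx =>
        intro s hs
        apply ihx
        unfold fhpBStep
        split_ifs with hnone
        · cases heq : PySem.List.pyGet? pred (x : Int) with
          | none => exact hs
          | some q =>
            dsimp only
            cases hgq : s.1.get? q with
            | none => exact hs
            | some u => rfl
        · exact hs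
    have hfold : ∀ (l : List Nat), i ∈ l →
        ((l.foldl (fhpBStep pred) (T, false)).2 = true) := by
      intro l
      induction l with
      | nil => intro hmem; cases hmem
      | cons x xs ihx =>
        intro hmem
        rw [List.foldl_cons]
        by_cases hxi : x = i
        · subst hxi
          have hstep : fhpBStep pred (T, false) x = (T.insert (x : Int) w, true) := by
            unfold fhpBStep
            rw [if_pos (by simp [hn])]
            rw [hp]
            dsimp only
            rw [hgp]
          exact htrue xs _ (by rw [hstep])
        · rcases List.mem_cons.1 hmem with h' | h'
          · exact absurd h'.symm hxi
          · cases hstep : fhpBStep pred (T, false) x with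
            | mk d b =>
              cases b with
              | true => exact htrue xs _ rfl
              | false =>
                have hd : d = T := by
                  unfold fhpBStep at hstep
                  split_ifs at hstep with hnone
                  · cases heq : PySem.List.pyGet? pred (x : Int) with
                    | none => rw [heq] at hstep; cases hstep; rfl
                    | some q =>
                      rw [heq] at hstep
                      dsimp only at hstep
                      cases hgq : T.get? q with
                      | none => rw [hgq] at hstep; cases hstep; rfl
                      | some u => rw [hgq] at hstep; cases hstep
                  · cases hstep; rfl
                rw [hd]
                exact ihx h'
    have := hfold (List.range pred.length) (by simpa using hi)
    unfold fhpPass at hfix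
    rw [hfix] at this
    cases this

-- completeness: whatever A's walk resolves, the fixpoint table has settled
theorem fhpFix_complete (src : Int) (pred : List Int) (T : PySem.Dict Int Int)
    (hok : fhpEntriesOK src pred = true)
    (hsc : ∀ c : Int, 0 ≤ c → c < pred.length → pred[c.toNat]! = src → (T.get? c).isSome)
    (hfix : fhpPass pred T = (T, false)) :
    ∀ (f : Nat) (c : Int) (v : Int), 0 ≤ c → c < pred.length →
      fhpALoop src pred f c = some v → (T.get? c).isSome := by
  intro f
  induction f with
  | zero => intro c v _ _ h; simp [fhpALoop] at h
  | succ f ih =>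
    intro c v h0 h1 h
    rw [fhpALoop, fhp_pyGet?_some pred c h0 h1] at h
    dsimp only at h
    by_cases hsrc : pred[c.toNat]! = src
    · exact hsc c h0 h1 hsrc
    · rw [if_neg hsrc] at h
      by_cases hm1 : pred[c.toNat]! = -1
      · rw [if_pos hm1] at h; cases h
      · rw [if_neg hm1] at h
        obtain ⟨hp0, hp1⟩ := fhpEntriesOK_bound src pred hok c h0 h1 hsrc hm1
        have hps := ih _ v hp0 hp1 h
        by_cases hcT : (T.get? c).isSome
        · exact hcT
        · exfalso
          have hcn : T.get? c = none := by
            rw [← Option.isNone_iff_eq_none]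
            simpa using hcT
          have hiN : ((c.toNat : Nat) : Int) = c := by omega
          have := fhpFix_elim pred T hfix c.toNat
            (by rw [List.mem_range]; omega)
            (by rw [hiN]; exact hcn)
            pred[c.toNat]!
            (by rw [hiN]; exact fhp_pyGet?_some pred c h0 h1)
          rw [this] at hps
          simp at hps

-- ===== VERDICT (by name: the statement is the Claim_ definition above) =====
theorem first_hop_from_pred_spec : Claim_equal_first_hop_from_pred := by
  intro src dest pred _ hpre
  unfold Spec_first_hop_from_pred first_hop_from_pred first_hop_from_pred_alt
  rcases hpre with hds | ⟨h0, h1, hcase⟩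
  · simp [hds]
  by_cases hds : dest = src
  · simp [hds]
  rw [if_neg hds, if_neg hds, fhp_pyGet?_some pred dest h0 h1]
  dsimp only
  by_cases hm1 : pred[dest.toNat]! = -1
  · rw [if_pos hm1, if_pos hm1]
  rw [if_neg hm1, if_neg hm1]
  have hseedinv := fhpInv_seed src pred
  have hinvT : fhpInv src pred (fhpRounds pred (pred.length + 1) (fhpSeed src pred)) :=
    fhpRounds_inv src pred _ _ hseedinv
  obtain ⟨hnd, hkr, hscT, hsndT⟩ := hinvT
  by_cases hsrc : pred[dest.toNat]! = src
  · -- dest is seeded with value dest, and A stops immediately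
    have hseed := fhpSeed_get_of_src src pred dest h0 h1 hsrc
    have hTd : (fhpRounds pred (pred.length + 1) (fhpSeed src pred)).get? dest = some dest :=
      fhpRounds_preserves pred _ _ dest dest hseed
    rw [hTd, fhpALoop, fhp_pyGet?_some pred dest h0 h1]
    dsimp only
    rw [if_pos hsrc]
  · obtain ⟨hok, hacyc⟩ : fhpEntriesOK src pred = true ∧ fhpAcyc src pred = true := by
      rcases hcase with h | h | h
      · exact absurd h hm1
      · exact absurd h hsrc
      · exact h
    have hfix : fhpPass pred (fhpRounds pred (pred.length + 1) (fhpSeed src pred))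
        = (fhpRounds pred (pred.length + 1) (fhpSeed src pred), false) :=
      fhpRounds_fix src pred _ _ hseedinv (by omega)
    have hterm : fhpTerm src pred ((fhpStep src pred)^[pred.length] dest) = true := by
      have hmem : dest.toNat ∈ List.range pred.length := by
        rw [List.mem_range]; omega
      have := (List.all_eq_true.mp hacyc) dest.toNat hmem
      have hcast : ((dest.toNat : Nat) : Int) = dest := by omega
      rw [hcast] at this
      exact this
    cases hTd : (fhpRounds pred (pred.length + 1) (fhpSeed src pred)).get? dest with
    | some w =>
      obtain ⟨f, hf⟩ := hsndT dest w hTd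
      exact fhpALoop_compress src pred hok pred.length dest h0 h1 hterm f w hf
    | none =>
      cases hA : fhpALoop src pred (pred.length + 1) dest with
      | none => rfl
      | some v =>
        exfalso
        have := fhpFix_complete src pred _ hok hscT hfix (pred.length + 1) dest v h0 h1 hA
        rw [hTd] at this
        simp at this
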